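-- pv_equiv track=rewrite | github.com/somebody422/dnssec_client | util.py | bytes_to_str
-- ===== SOURCE A (Python) =====
-- def bytes_to_str(data):
--     """
--     Converts bytes to a string with .'s at non lowercase letter characters
--     :param data: The bytes
--     :return: The string
--     """
--     s = ""
--     for bit in data:
--         if chr(bit) < ' ' or bit >= 127:
--             s += '.'
--         else:
--             s += chr(bit)
--     return s
-- ===== SOURCE B (Python) =====
-- def bytes_to_str(data):
--     chunks = []
--     i = 0
--     n = len(data)
--     while i < n:
--         j = i
--         while j < n and 32 <= data[j] <= 126:
--             j += 1
--         chunks.append(''.join(chr(b) for b in data[i:j]))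
--         if j < n:
--             chunks.append('.')
--             j += 1
--         i = j
--     return ''.join(chunks)
-- ===== Notes on version B (the rewrite author's own statement) =====
-- stated objective: alternative
-- what changed: B replaces A's per-byte branch-and-concatenate loop by a run-based scan: it finds each maximal run of printable bytes, converts the run wholesale, emits one '.' per separating non-printable byte, and joins the chunks at the end.
import Mathlib
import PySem

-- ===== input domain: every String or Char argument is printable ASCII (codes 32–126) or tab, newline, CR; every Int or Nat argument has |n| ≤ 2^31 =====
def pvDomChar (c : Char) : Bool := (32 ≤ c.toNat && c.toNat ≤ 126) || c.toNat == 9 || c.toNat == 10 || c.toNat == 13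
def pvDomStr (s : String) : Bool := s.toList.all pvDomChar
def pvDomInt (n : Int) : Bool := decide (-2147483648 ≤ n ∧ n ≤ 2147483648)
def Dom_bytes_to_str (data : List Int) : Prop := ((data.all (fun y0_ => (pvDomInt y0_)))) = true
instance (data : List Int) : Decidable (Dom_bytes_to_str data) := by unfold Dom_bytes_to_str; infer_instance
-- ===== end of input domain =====

-- B replaces A's per-byte branch + string concatenation by a run-based scan that copies
-- maximal printable runs wholesale and joins the chunks (objective: alternative).

-- ===== PORT A =====
def bytes_to_str (data : List Int) : String :=
  data.foldl
    (fun s bit =>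
      if bit < 32 ∨ 127 ≤ bit then s ++ "."
      else s ++ String.ofList [Char.ofNat bit.toNat]) ""

-- ===== PORT B =====
def pvPrint (b : Int) : Bool := 32 ≤ b && b ≤ 126

-- the outer while loop of Source B: one maximal printable run (the inner while = takeWhile),
-- then one '.' for the following bad byte, recurse on the remainder
def pvChunks : List Int → List String
  | [] => []
  | b :: rest =>
    if pvPrint b then
      String.ofList ((List.takeWhile pvPrint (b :: rest)).map (fun x => Char.ofNat x.toNat))
        :: pvChunks (List.dropWhile pvPrint (b :: rest))
    else
      "" :: "." :: pvChunks rest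
termination_by l => l.length
decreasing_by
  · simpa [List.dropWhile_cons, *] using
      Nat.lt_succ_of_le (List.length_dropWhile_le pvPrint rest)
  · simp

def bytes_to_str_alt (data : List Int) : String :=
  String.join (pvChunks data)

-- ===== PRECONDITION & SPEC =====
-- Pre_ excludes exactly the inputs where Python's chr(bit) raises ValueError (negative or > 0x10FFFF).
def Pre_bytes_to_str (data : List Int) : Prop := ∀ b ∈ data, 0 ≤ b ∧ b ≤ 1114111
instance (data : List Int) : Decidable (Pre_bytes_to_str data) := by unfold Pre_bytes_to_str; infer_instance
def pvWitness_bytes_to_str : List Int := [72, 105, 9, 200, 1000]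

def Spec_bytes_to_str (data : List Int) (out : String) : Prop := out = bytes_to_str_alt data
instance (data : List Int) (out : String) : Decidable (Spec_bytes_to_str data out) := by unfold Spec_bytes_to_str; infer_instance

-- ===== CLAIM =====
def Claim_equal_bytes_to_str : Prop := ∀ (data : List Int), Dom_bytes_to_str data → Pre_bytes_to_str data → Spec_bytes_to_str data (bytes_to_str data)

-- ===== LEMMAS AND PROOFS =====

-- A's (and B's) per-byte contribution
def pvElt (b : Int) : String := if pvPrint b then String.ofList [Char.ofNat b.toNat] else "."

lemma foldl_append_str (t : List String) (u v : String) :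
    t.foldl (· ++ ·) (u ++ v) = u ++ t.foldl (· ++ ·) v := by
  induction t generalizing u v with
  | nil => rfl
  | cons a t iht => simp only [List.foldl_cons, String.append_assoc, iht]

lemma join_cons (a : String) (l : List String) :
    String.join (a :: l) = a ++ String.join l := by
  simp only [String.join, List.foldl_cons]
  have := foldl_append_str l a ""
  simpa using this

lemma join_map_append (l1 l2 : List Int) :
    String.join ((l1 ++ l2).map pvElt) = String.join (l1.map pvElt) ++ String.join (l2.map pvElt) := by
  induction l1 with
  | nil => simp [String.join]
  | cons a t ih => simp only [List.cons_append, List.map_cons, join_cons, ih, String.append_assoc]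

lemma run_join (run : List Int) (h : ∀ x ∈ run, pvPrint x = true) :
    String.ofList (run.map (fun x => Char.ofNat x.toNat)) = String.join (run.map pvElt) := by
  induction run with
  | nil => rfl
  | cons b rest ih =>
    have hb : pvPrint b = true := h b (List.mem_cons_self ..)
    simp only [List.map_cons, join_cons, pvElt, hb, if_pos]
    rw [← ih (fun x hx => h x (List.mem_cons_of_mem _ hx)),
      show (Char.ofNat b.toNat :: rest.map (fun x => Char.ofNat x.toNat))
        = [Char.ofNat b.toNat] ++ rest.map (fun x => Char.ofNat x.toNat) from rfl,
      String.ofList_append]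

lemma chunks_join (data : List Int) :
    String.join (pvChunks data) = String.join (data.map pvElt) := by
  fun_induction pvChunks data with
  | case1 => rfl
  | case2 b rest hp ih =>
    rw [join_cons, ih,
      run_join _ (fun x hx => List.mem_takeWhile_imp hx),
      ← join_map_append, List.takeWhile_append_dropWhile]
  | case3 b rest hp ih =>
    simp only [List.map_cons, join_cons, ih, pvElt, hp, if_neg, String.empty_append,
      Bool.false_eq_true, not_false_eq_true]

lemma fold_acc (data : List Int) (s : String) :
    data.foldl
      (fun s bit =>
        if bit < 32 ∨ 127 ≤ bit then s ++ "."
        else s ++ String.ofList [Char.ofNat bit.toNat]) s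
      = s ++ String.join (data.map pvElt) := by
  induction data generalizing s with
  | nil => simp [String.join]
  | cons b rest ih =>
    simp only [List.foldl_cons, List.map_cons, join_cons, ih]
    have : (if b < 32 ∨ 127 ≤ b then s ++ "." else s ++ String.ofList [Char.ofNat b.toNat])
        = s ++ pvElt b := by
      unfold pvElt pvPrint
      split_ifs with h1 h2 h2 <;> first | rfl | (exfalso; simp at h2; omega)
    rw [this, String.append_assoc]

-- ===== VERDICT =====
theorem bytes_to_str_spec : Claim_equal_bytes_to_str := by
  intro data _ _
  unfold Spec_bytes_to_str bytes_to_str bytes_to_str_alt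
  rw [fold_acc data "", chunks_join, String.empty_append]
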